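-- pv_equiv track=rewrite | github.com/DouglasTitze/AdventCalender | Day 3/Day3-P2.py | diagnostic
-- ===== SOURCE A (Python) =====
-- def diagnostic(lst, column, typ):
--
--     l = len(lst)
--
--     if l != 1:
--
--         ones = []
--         zeros = []
--         for row in range(l):
--
--             if lst[row][column] == "1":
--                 ones.append(lst[row])
--             else:
--                 zeros.append(lst[row])
--
--         len_one = len(ones)
--         len_zer = len(zeros)
--
--         if typ == "oxy":
--             if len_one > len_zer:
--                 return ones
--             elif len_zer > len_one:
--                 return zeros
--             else:
--                 return ones
--         else:
--             if len_one < len_zer: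
--                 return ones
--             elif len_zer < len_one:
--                 return zeros
--             else:
--                 return zeros
--     else:
--         return lst
-- ===== SOURCE B (Python) =====
-- def diagnostic(lst, column, typ):
--     if len(lst) == 1:
--         return lst
--     ones = sum(1 for row in lst if row[column] == "1")
--     zeros = len(lst) - ones
--     keep_one = ones >= zeros if typ == "oxy" else ones < zeros
--     return [row for row in lst if (row[column] == "1") == keep_one]
-- ===== Notes on version B (the rewrite author's own statement) =====
-- stated objective: simpler
-- what changed: Replaces the dual-list partition loop and six-way branch tree with a single one-pass count of '1' bits, a derived keep-ones boolean, and one filtering comprehension.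
import Mathlib
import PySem

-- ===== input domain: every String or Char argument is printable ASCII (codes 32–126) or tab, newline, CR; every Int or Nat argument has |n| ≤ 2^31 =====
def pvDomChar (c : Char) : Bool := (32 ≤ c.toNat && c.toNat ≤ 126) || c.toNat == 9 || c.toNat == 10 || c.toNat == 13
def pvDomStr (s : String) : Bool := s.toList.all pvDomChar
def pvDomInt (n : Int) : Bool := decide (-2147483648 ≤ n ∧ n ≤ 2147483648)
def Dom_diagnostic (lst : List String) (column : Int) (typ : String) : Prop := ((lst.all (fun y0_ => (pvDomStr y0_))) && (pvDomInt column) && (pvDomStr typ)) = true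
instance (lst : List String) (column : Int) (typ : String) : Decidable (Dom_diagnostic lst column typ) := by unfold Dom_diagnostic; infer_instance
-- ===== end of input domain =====

-- B replaces A's dual-list partition loop and six-way branch tree with one count of '1' bits,
-- a derived keep-ones boolean and a single filtering pass (objective: simpler).


-- ===== PORT A =====
-- the for-loop over range(l) reading lst[row] is ported as a fold over the rows themselves
-- (exact: row runs over every index in order); lst[row][column] is PySem.List.pyGet? on the
-- row's characters; its none case (Python IndexError, excluded by Pre_) takes the else branch.
def diagnostic (lst : List String) (column : Int) (typ : String) : List String :=
  let l := lst.length
  if l ≠ 1 then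
    let oz := lst.foldl (fun (acc : List String × List String) row =>
      if PySem.List.pyGet? row.toList column = some '1' then (acc.1 ++ [row], acc.2)
      else (acc.1, acc.2 ++ [row])) ([], [])
    let ones := oz.1
    let zeros := oz.2
    let len_one := ones.length
    let len_zer := zeros.length
    if typ = "oxy" then
      if len_one > len_zer then ones
      else if len_zer > len_one then zeros
      else ones
    else
      if len_one < len_zer then ones
      else if len_zer < len_one then zeros
      else zeros
  else lst

-- ===== PORT B =====
-- sum(1 for row in lst if row[column]=="1") is List.countP; the comprehension is List.filter.
def diagnostic_alt (lst : List String) (column : Int) (typ : String) : List String :=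
  if lst.length = 1 then lst
  else
    let ones := lst.countP (fun row => PySem.List.pyGet? row.toList column = some '1')
    let zeros := lst.length - ones
    let keepOne := if typ = "oxy" then decide (ones ≥ zeros) else decide (ones < zeros)
    lst.filter (fun row => (decide (PySem.List.pyGet? row.toList column = some '1')) == keepOne)

-- ===== PRECONDITION & SPEC =====
-- Pre_ excludes exactly the inputs where Python A raises IndexError: with more than one row
-- (the l == 1 branch never indexes), some row's column index out of range.
def Pre_diagnostic (lst : List String) (column : Int) (typ : String) : Prop :=
  lst.length = 1 ∨ ∀ row ∈ lst, PySem.Raise.InRange row.toList.length column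
instance (lst : List String) (column : Int) (typ : String) : Decidable (Pre_diagnostic lst column typ) := by unfold Pre_diagnostic; infer_instance
def pvWitness_diagnostic : List String × Int × String := (["10", "11", "01"], 0, "oxy")

def Spec_diagnostic (lst : List String) (column : Int) (typ : String) (out : List String) : Prop := out = diagnostic_alt lst column typ
instance (lst : List String) (column : Int) (typ : String) (out : List String) : Decidable (Spec_diagnostic lst column typ out) := by unfold Spec_diagnostic; infer_instance

-- ===== CLAIM (what is proved, stated in full; the proofs are below) =====
def Claim_equal_diagnostic : Prop := ∀ (lst : List String) (column : Int) (typ : String), Dom_diagnostic lst column typ → Pre_diagnostic lst column typ → Spec_diagnostic lst column typ (diagnostic lst column typ)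

-- ===== LEMMAS AND PROOFS =====

-- A's partition fold produces the two complementary filters (in order).
theorem pv_fold_partition (p : String → Prop) [DecidablePred p] (lst o z : List String) :
    lst.foldl (fun (acc : List String × List String) row =>
      if p row then (acc.1 ++ [row], acc.2) else (acc.1, acc.2 ++ [row])) (o, z)
    = (o ++ lst.filter (fun r => decide (p r)), z ++ lst.filter (fun r => !decide (p r))) := by
  induction lst generalizing o z with
  | nil => simp
  | cons x xs ih =>
    by_cases h : p x <;> simp [List.foldl, h, ih, List.filter]

theorem pv_filter_not_len (p : String → Bool) (lst : List String) :
    (lst.filter (fun r => !p r)).length = lst.length - (lst.filter p).length := by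
  induction lst with
  | nil => rfl
  | cons x xs ih =>
    by_cases h : p x <;>
      simp [List.filter, h, ih, Nat.succ_sub (List.length_filter_le p xs)]

theorem diagnostic_spec : Claim_equal_diagnostic := by
  unfold Claim_equal_diagnostic
  intro lst column typ _ _
  unfold Spec_diagnostic diagnostic diagnostic_alt
  by_cases h1 : lst.length = 1
  · simp [h1]
  · have hfold := pv_fold_partition
      (fun row => PySem.List.pyGet? row.toList column = some '1') lst [] []
    simp only [List.nil_append] at hfold
    simp only [h1, hfold, ne_eq, not_false_iff, if_true, if_false]
    have hF : (lst.filter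
        (fun r => decide (PySem.List.pyGet? r.toList column = some '1'))).length
        = lst.countP (fun r => decide (PySem.List.pyGet? r.toList column = some '1')) :=
      (List.countP_eq_length_filter ..).symm
    have hG : (lst.filter
        (fun r => !decide (PySem.List.pyGet? r.toList column = some '1'))).length
        = lst.length - lst.countP (fun r => decide (PySem.List.pyGet? r.toList column = some '1')) := by
      rw [pv_filter_not_len, hF]
    have hcle : lst.countP (fun r => decide (PySem.List.pyGet? r.toList column = some '1'))
        ≤ lst.length := List.countP_le_length
    by_cases ht : typ = "oxy"
    · simp only [ht, ite_true]
      by_cases hge : lst.countP (fun r => decide (PySem.List.pyGet? r.toList column = some '1'))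
          ≥ lst.length - lst.countP (fun r => decide (PySem.List.pyGet? r.toList column = some '1'))
      · have hb := decide_eq_true hge
        simp only [hb, beq_true]
        split_ifs with ha hc
        · rfl
        · exfalso; rw [hF, hG] at hc; omega
        · rfl
      · have hb := decide_eq_false hge
        simp only [hb, beq_false]
        split_ifs with ha hc
        · exfalso; rw [hF, hG] at ha; omega
        · rfl
        · exfalso; rw [hF, hG] at ha hc; omega
    · simp only [ht, ite_false]
      by_cases hlt : lst.countP (fun r => decide (PySem.List.pyGet? r.toList column = some '1'))
          < lst.length - lst.countP (fun r => decide (PySem.List.pyGet? r.toList column = some '1'))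
      · have hb := decide_eq_true hlt
        simp only [hb, beq_true]
        split_ifs with ha hc
        · rfl
        · exfalso; rw [hF, hG] at hc; omega
        · exfalso; rw [hF, hG] at ha hc; omega
      · have hb := decide_eq_false hlt
        simp only [hb, beq_false]
        split_ifs with ha hc
        · exfalso; rw [hF, hG] at ha; omega
        · rfl
        · rfl
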